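-- pv_equiv track=rewrite | github.com/baesh3744/algorithm-solutions | baekjoon/01000/1146.py | count
-- ===== SOURCE A (Python) =====
-- from math import comb
--
-- MOD = 1000000
--
-- def count(n: int) -> int:
--     if n == 1:
--         return 1
--
--     cache = [0 for _ in range(n + 1)]
--
--     cache[0] = cache[1] = 1
--     for i in range(2, n + 1):
--         for k in range(i):
--             cache[i] += comb(i - 1, k) * cache[k] * cache[i - k - 1]
--         cache[i] = cache[i] // 2 % MOD
--
--     return cache[n] * 2 % MOD
-- ===== SOURCE B (Python) =====
-- MOD = 1000000
--
--
-- def count(n: int) -> int: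
--     if n == 1:
--         return 1
--
--     cache = [1, 1]
--     row = [1]  # Pascal row: binomial coefficients C(0, .)
--     for i in range(2, n + 1):
--         # extend row from C(i-2, .) to C(i-1, .) by Pascal's rule
--         row = [1] + [row[j] + row[j + 1] for j in range(i - 2)] + [1]
--         # terms are symmetric under k <-> i-1-k, so sum one half and double
--         half = sum(row[k] * cache[k] * cache[i - 1 - k] for k in range(i // 2))
--         mid = row[i // 2] * cache[i // 2] ** 2 if i % 2 == 1 else 0
--         cache.append((2 * half + mid) // 2 % MOD)
--
--     return cache[n] * 2 % MOD
-- ===== Notes on version B (the rewrite author's own statement) =====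
-- stated objective: faster
-- what changed: B maintains each Pascal-triangle row incrementally (one addition per binomial) instead of calling math.comb for every term, and uses the k <-> i-1-k symmetry of the inner terms to sum only half of them, doubling and adding the middle term.
-- outside the precondition, e.g. on count(0): A raises IndexError, B returns 2
import Mathlib
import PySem

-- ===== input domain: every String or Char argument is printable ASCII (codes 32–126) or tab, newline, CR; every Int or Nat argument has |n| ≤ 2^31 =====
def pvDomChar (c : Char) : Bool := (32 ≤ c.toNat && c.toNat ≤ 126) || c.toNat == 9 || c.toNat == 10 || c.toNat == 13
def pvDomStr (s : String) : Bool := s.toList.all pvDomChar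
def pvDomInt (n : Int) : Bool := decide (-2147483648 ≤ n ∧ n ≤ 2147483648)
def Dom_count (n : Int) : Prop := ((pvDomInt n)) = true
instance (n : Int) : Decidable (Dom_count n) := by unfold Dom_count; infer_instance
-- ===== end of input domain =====

-- B replaces the per-term math.comb calls by an incrementally maintained Pascal row and
-- sums only half of the symmetric inner terms; measured much faster at large n.

-- ===== PORT A =====
-- math.comb(a, b); A only calls it with 0 ≤ b ≤ a, where Nat.choose is exact
def pyComb (a b : Int) : Int := (a.toNat.choose b.toNat : Int)

def count (n : Int) : Int :=
  if n = 1 then 1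
  else
    let cache : List Int := (PySem.List.pyRange 0 (n+1) 1).map (fun _ => (0:Int))
    let cache := PySem.List.pySetD (PySem.List.pySetD cache 0 1) 1 1
    let cache := (PySem.List.pyRange 2 (n+1) 1).foldl
      (fun cache i =>
        let v := (PySem.List.pyRange 0 i 1).foldl
          (fun acc k => acc + pyComb (i-1) k * PySem.List.pyGetD cache k 0 *
            PySem.List.pyGetD cache (i-k-1) 0)
          (PySem.List.pyGetD cache i 0)
        PySem.List.pySetD cache i (PySem.Int.mod (PySem.Int.floordiv v 2) 1000000))
      cache
    PySem.Int.mod (PySem.List.pyGetD cache n 0 * 2) 1000000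

-- ===== PORT B =====
def count_alt (n : Int) : Int :=
  if n = 1 then 1
  else
    let st := (PySem.List.pyRange 2 (n+1) 1).foldl
      (fun (st : List Int × List Int) i =>
        let cache := st.1
        let row := st.2
        let row := [1] ++ ((PySem.List.pyRange 0 (i-2) 1).map
            (fun j => PySem.List.pyGetD row j 0 + PySem.List.pyGetD row (j+1) 0)) ++ [1]
        let half := ((PySem.List.pyRange 0 (PySem.Int.floordiv i 2) 1).map
            (fun k => PySem.List.pyGetD row k 0 * PySem.List.pyGetD cache k 0 *
              PySem.List.pyGetD cache (i-1-k) 0)).sum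
        let mid := if PySem.Int.mod i 2 = 1 then
            PySem.List.pyGetD row (PySem.Int.floordiv i 2) 0 *
              PySem.List.pyGetD cache (PySem.Int.floordiv i 2) 0 ^ 2
          else 0
        (cache ++ [PySem.Int.mod (PySem.Int.floordiv (2 * half + mid) 2) 1000000], row))
      ([1, 1], [1])
    PySem.Int.mod (PySem.List.pyGetD st.1 n 0 * 2) 1000000

-- ===== PRECONDITION & SPEC =====
-- Pre_ excludes n ≤ 0, on which A raises IndexError (cache[1] on a too-short list).
def Pre_count (n : Int) : Prop := 1 ≤ n
instance (n : Int) : Decidable (Pre_count n) := by unfold Pre_count; infer_instance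
def pvWitness_count : Int := 3

def Spec_count (n : Int) (out : Int) : Prop := out = count_alt n
instance (n : Int) (out : Int) : Decidable (Spec_count n out) := by unfold Spec_count; infer_instance

-- ===== CLAIM (what is proved, stated in full; the proofs are below) =====
def Claim_equal_count : Prop := ∀ (n : Int), Dom_count n → Pre_count n → Spec_count n (count n)

-- ===== LEMMAS AND PROOFS =====

-- the mathematical value sequence both programs compute
def cref : Nat → Int
  | 0 => 1
  | 1 => 1
  | (i+2) =>
      PySem.Int.mod (PySem.Int.floordiv
        (((List.range (i+2)).attach.map
            (fun k => ((i+1).choose k.1 : Int) * cref k.1 * cref (i+1 - k.1))).sum) 2) 1000000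
  decreasing_by
  · exact List.mem_range.mp k.2
  · have := List.mem_range.mp k.2; omega

lemma cref_add_two (i : Nat) :
    cref (i+2) =
      PySem.Int.mod (PySem.Int.floordiv
        (((List.range (i+2)).map
            (fun k => ((i+1).choose k : Int) * cref k * cref (i+1 - k))).sum) 2) 1000000 := by
  rw [cref]
  congr 2
  simp

-- A's loop body and initial cache, named for the proofs (definitionally the lambdas in `count`)
def initA (n : Int) : List Int :=
  PySem.List.pySetD (PySem.List.pySetD ((PySem.List.pyRange 0 (n+1) 1).map (fun _ => (0:Int))) 0 1) 1 1

def stepA (cache : List Int) (i : Int) : List Int :=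
  let v := (PySem.List.pyRange 0 i 1).foldl
    (fun acc k => acc + pyComb (i-1) k * PySem.List.pyGetD cache k 0 *
      PySem.List.pyGetD cache (i-k-1) 0)
    (PySem.List.pyGetD cache i 0)
  PySem.List.pySetD cache i (PySem.Int.mod (PySem.Int.floordiv v 2) 1000000)

def stepB (st : List Int × List Int) (i : Int) : List Int × List Int :=
  let cache := st.1
  let row := st.2
  let row := [1] ++ ((PySem.List.pyRange 0 (i-2) 1).map
      (fun j => PySem.List.pyGetD row j 0 + PySem.List.pyGetD row (j+1) 0)) ++ [1]
  let half := ((PySem.List.pyRange 0 (PySem.Int.floordiv i 2) 1).map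
      (fun k => PySem.List.pyGetD row k 0 * PySem.List.pyGetD cache k 0 *
        PySem.List.pyGetD cache (i-1-k) 0)).sum
  let mid := if PySem.Int.mod i 2 = 1 then
      PySem.List.pyGetD row (PySem.Int.floordiv i 2) 0 *
        PySem.List.pyGetD cache (PySem.Int.floordiv i 2) 0 ^ 2
    else 0
  (cache ++ [PySem.Int.mod (PySem.Int.floordiv (2 * half + mid) 2) 1000000], row)

lemma count_eq (n : Int) (h : ¬ n = 1) :
    count n = PySem.Int.mod
      (PySem.List.pyGetD ((PySem.List.pyRange 2 (n+1) 1).foldl stepA (initA n)) n 0 * 2) 1000000 := by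
  simp only [count, if_neg h]; rfl

lemma count_alt_eq (n : Int) (h : ¬ n = 1) :
    count_alt n = PySem.Int.mod
      (PySem.List.pyGetD (((PySem.List.pyRange 2 (n+1) 1).foldl stepB ([1,1],[1])).1) n 0 * 2) 1000000 := by
  simp only [count_alt, if_neg h]; rfl

-- symmetric sums over `range i` can be folded in half
lemma sum_range_symm (f : Nat → Int) (i : Nat) (hsym : ∀ k < i, f k = f (i-1-k)) :
    ((List.range i).map f).sum =
      2 * ((List.range (i/2)).map f).sum + (if i % 2 = 1 then f (i/2) else 0) := by
  induction i using Nat.twoStepInduction generalizing f with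
  | zero => simp
  | one => simp
  | more i ih _ =>
    have hg : ∀ k < i, (f ∘ (·+1)) k = (f ∘ (·+1)) (i-1-k) := by
      intro k hk
      simp only [Function.comp]
      have := hsym (k+1) (by omega)
      have h2 : i + 2 - 1 - (k+1) = (i - 1 - k) + 1 := by omega
      rw [this, h2]
    have key := ih (f ∘ (·+1)) hg
    have hlast : f (i+1) = f 0 := by
      have := hsym (i+1) (by omega); simpa using this
    have e1 : (List.range (i+2)).map f = f 0 :: ((List.range (i+1)).map (f ∘ (·+1))) := by
      rw [List.range_succ_eq_map]; simp
    have e2 : (List.range (i+1)).map (f ∘ (·+1)) = (List.range i).map (f ∘ (·+1)) ++ [f (i+1)] := by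
      rw [List.range_succ]; simp [Function.comp]
    have e3 : (List.range ((i+2)/2)).map f = f 0 :: ((List.range (i/2)).map (f ∘ (·+1))) := by
      have : (i+2)/2 = i/2 + 1 := by omega
      rw [this, List.range_succ_eq_map]; simp
    have e4 : (i+2) % 2 = i % 2 := by omega
    have e5 : (i+2)/2 = i/2 + 1 := by omega
    rw [e1, e3, e4, e5]
    simp only [List.sum_cons, e2, List.sum_append, List.sum_cons, List.sum_nil, key]
    rw [hlast]
    rcases Nat.mod_two_eq_zero_or_one i with h | h
    · simp [h]; ring
    · simp only [h, Function.comp]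
      ring

-- indexing into a mapped range with possible padding
lemma pyGetD_map_range_append (g : Nat → Int) (m k : Nat) (hk : k < m) (xs : List Int) :
    PySem.List.pyGetD ((List.range m).map g ++ xs) (k : Int) 0 = g k := by
  rw [PySem.List.pyGetD_natCast, List.getD_eq_getElem?_getD,
    List.getElem?_append_left (by simpa using hk)]
  simp [hk]

lemma pyGetD_map_range (g : Nat → Int) (m k : Nat) (hk : k < m) :
    PySem.List.pyGetD ((List.range m).map g) (k : Int) 0 = g k := by
  rw [PySem.List.pyGetD_natCast, List.getD_eq_getElem?_getD, List.getElem?_map]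
  simp [hk]

lemma initA_eq (N : Nat) (h : 1 ≤ N) :
    initA (N : Int) = (List.range 2).map cref ++ List.replicate (N - 1) 0 := by
  unfold initA
  have h0 : ((PySem.List.pyRange 0 ((N:Int)+1) 1).map (fun _ => (0:Int)))
      = List.replicate (N+1) 0 := by
    apply List.eq_replicate_iff.mpr
    constructor
    · simp [PySem.List.length_pyRange_one]
    · intro b hb
      rcases List.mem_map.mp hb with ⟨x, _, hx⟩
      exact hx.symm
  rw [h0]
  obtain ⟨M, rfl⟩ : ∃ M, N = M + 1 := ⟨N-1, by omega⟩
  have e1 : M + 1 + 1 = (M+2) := by omega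
  rw [e1, List.replicate_succ, List.replicate_succ]
  simp [PySem.List.pySetD_of_nonneg, List.range_succ, cref]

lemma stepA_eq (N m : Nat) (h1 : 1 ≤ m) (hm : m < N) :
    stepA ((List.range (m+1)).map cref ++ List.replicate (N-m) 0) ((m:Int)+1)
      = (List.range (m+2)).map cref ++ List.replicate (N-(m+1)) 0 := by
  unfold stepA
  set cache := (List.range (m+1)).map cref ++ List.replicate (N-m) 0 with hc
  have hcast : (m:Int)+1 = ((m+1:Nat):Int) := by push_cast; ring
  obtain ⟨P, hNm⟩ : ∃ P, N - m = P + 1 := ⟨N-m-1, by omega⟩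
  have hsplit : cache = (List.range (m+1)).map cref ++ ((0:Int) :: List.replicate P 0) := by
    rw [hc, hNm, List.replicate_succ]
  have hinit : PySem.List.pyGetD cache ((m:Int)+1) 0 = 0 := by
    rw [hcast, PySem.List.pyGetD_natCast, List.getD_eq_getElem?_getD, hsplit,
      List.getElem?_append_right (by simp)]
    simp
  have hfold : (PySem.List.pyRange 0 ((m:Int)+1) 1).foldl
      (fun acc k => acc + pyComb ((m:Int)+1-1) k * PySem.List.pyGetD cache k 0 *
        PySem.List.pyGetD cache ((m:Int)+1-k-1) 0)
      (PySem.List.pyGetD cache ((m:Int)+1) 0)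
      = ((List.range (m+1)).map (fun k => (m.choose k : Int) * cref k * cref (m-k))).sum := by
    rw [hinit, PySem.List.foldl_add, hcast, PySem.List.pyRange_zero_natCast, List.map_map]
    rw [zero_add]
    congr 1
    apply List.map_congr_left
    intro k hk
    have hk' : k ≤ m := by simpa [Nat.lt_succ_iff] using List.mem_range.mp hk
    have e1 : ((m+1:Nat):Int) - 1 = (m:Int) := by push_cast; ring
    have e2 : pyComb (m:Int) (k:Int) = (m.choose k : Int) := by
      unfold pyComb; simp
    have e3 : PySem.List.pyGetD cache (k:Int) 0 = cref k := by
      rw [hc]; exact pyGetD_map_range_append cref (m+1) k (by omega) _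
    have e4 : ((m+1:Nat):Int) - (k:Int) - 1 = ((m-k : Nat) : Int) := by
      push_cast [Nat.cast_sub hk']; ring
    have e5 : PySem.List.pyGetD cache (((m-k:Nat)):Int) 0 = cref (m-k) := by
      rw [hc]; exact pyGetD_map_range_append cref (m+1) (m-k) (by omega) _
    simp only [Function.comp, e1, e2, e4, e3, e5]
  have hv : PySem.Int.mod (PySem.Int.floordiv
      (((List.range (m+1)).map (fun k => (m.choose k : Int) * cref k * cref (m-k))).sum) 2) 1000000
      = cref (m+1) := by
    obtain ⟨M, rfl⟩ : ∃ M, m = M+1 := ⟨m-1, by omega⟩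
    rw [show M+1+1 = M+2 from rfl, cref_add_two M]
  rw [hfold]
  show PySem.List.pySetD cache ((m:Int)+1)
      (PySem.Int.mod (PySem.Int.floordiv
        (((List.range (m+1)).map (fun k => (m.choose k : Int) * cref k * cref (m-k))).sum) 2) 1000000)
      = _
  rw [hv, hcast, PySem.List.pySetD_natCast, hsplit]
  have hset : ((List.range (m+1)).map cref ++ ((0:Int) :: List.replicate P 0)).set
      (((List.range (m+1)).map cref).length) (cref (m+1))
      = (List.range (m+1)).map cref ++ (cref (m+1) :: List.replicate P 0) := by
    simp
  simp only [List.length_map, List.length_range] at hset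
  rw [hset, show P = N-(m+1) by omega]
  simp [List.range_succ]

lemma row_update (M : Nat) :
    [(1:Int)] ++ ((List.range M).map (fun j => ((M).choose j : Int) + ((M).choose (j+1) : Int))) ++ [1]
      = (List.range (M+2)).map (fun k => ((M+1).choose k : Int)) := by
  rw [show M+2 = (M+1)+1 from rfl, List.range_succ_eq_map]
  rw [List.range_succ]
  simp only [List.map_cons, List.map_map, List.map_append]
  rw [Nat.choose_self, Nat.choose_zero_right]
  congr 1

lemma stepB_eq (m : Nat) (h1 : 1 ≤ m) :
    stepB ((List.range (m+1)).map cref, (List.range m).map (fun k => ((m-1).choose k : Int))) ((m:Int)+1)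
      = ((List.range (m+2)).map cref, (List.range (m+1)).map (fun k => (m.choose k : Int))) := by
  obtain ⟨M, rfl⟩ : ∃ M, m = M+1 := ⟨m-1, by omega⟩
  unfold stepB
  dsimp only
  have hrow : ([(1:Int)] ++ ((PySem.List.pyRange 0 (((M+1:Nat):Int)+1-2)).map
        (fun j => PySem.List.pyGetD ((List.range (M+1)).map (fun k => ((M+1-1).choose k : Int))) j 0
          + PySem.List.pyGetD ((List.range (M+1)).map (fun k => ((M+1-1).choose k : Int))) (j+1) 0)) ++ [1])
      = (List.range (M+2)).map (fun k => (((M+1).choose k : Nat) : Int)) := by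
    have c1 : ((M+1:Nat):Int)+1-2 = ((M:Nat):Int) := by push_cast; ring
    rw [c1, PySem.List.pyRange_zero_natCast, List.map_map]
    rw [← row_update M]
    congr 1
    congr 1
    apply List.map_congr_left
    intro j hj
    have hj' : j < M := List.mem_range.mp hj
    have g1 : PySem.List.pyGetD ((List.range (M+1)).map (fun k => ((M+1-1).choose k : Int))) (j:Int) 0
        = ((M.choose j : Nat) : Int) := by
      rw [pyGetD_map_range _ (M+1) j (by omega)]; simp
    have g2 : PySem.List.pyGetD ((List.range (M+1)).map (fun k => ((M+1-1).choose k : Int))) ((j:Int)+1) 0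
        = ((M.choose (j+1) : Nat) : Int) := by
      rw [show ((j:Int)+1) = ((j+1:Nat):Int) by push_cast; ring,
        pyGetD_map_range _ (M+1) (j+1) (by omega)]
      simp
    simp only [Function.comp, g1, g2]
  rw [hrow]
  have cI : ((M+1:Nat):Int)+1 = ((M+2:Nat):Int) := by push_cast; ring
  rw [cI]
  have cD : PySem.Int.floordiv ((M+2:Nat):Int) 2 = (((M+2)/2 : Nat):Int) := by
    exact_mod_cast PySem.Int.floordiv_natCast (M+2) 2
  have cM : PySem.Int.mod ((M+2:Nat):Int) 2 = (((M+2)%2 : Nat):Int) := by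
    exact_mod_cast PySem.Int.mod_natCast (M+2) 2
  rw [cD, cM, show M+1+1 = M+2 from rfl, show M+1+2 = M+3 from rfl]
  have hhalf : ((PySem.List.pyRange 0 ((((M+2)/2 : Nat)):Int)).map
      (fun k => PySem.List.pyGetD ((List.range (M+2)).map (fun k => (((M+1).choose k : Nat):Int))) k 0 *
        PySem.List.pyGetD ((List.range (M+2)).map cref) k 0 *
        PySem.List.pyGetD ((List.range (M+2)).map cref) (((M+2:Nat):Int)-1-k) 0)).sum
      = ((List.range ((M+2)/2)).map
          (fun k => (((M+1).choose k : Nat):Int) * cref k * cref (M+1-k))).sum := by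
    rw [PySem.List.pyRange_zero_natCast, List.map_map]
    congr 1
    apply List.map_congr_left
    intro k hk
    have hk' : k < (M+2)/2 := List.mem_range.mp hk
    have hkM : k ≤ M+1 := by omega
    have g1 := pyGetD_map_range (fun k => (((M+1).choose k : Nat):Int)) (M+2) k (by omega)
    have g2 := pyGetD_map_range cref (M+2) k (by omega)
    have c5 : ((M+2:Nat):Int)-1-(k:Int) = ((M+1-k:Nat):Int) := by
      push_cast [Nat.cast_sub hkM]; ring
    have g3 := pyGetD_map_range cref (M+2) (M+1-k) (by omega)
    simp only [Function.comp, g1, g2, c5, g3]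
  rw [hhalf]
  have hsym : ∀ k < M+2, (((M+1).choose k : Nat):Int) * cref k * cref (M+1-k)
      = (((M+1).choose (M+2-1-k) : Nat):Int) * cref (M+2-1-k) * cref (M+1-(M+2-1-k)) := by
    intro k hk
    have e : M+2-1-k = M+1-k := by omega
    have e2 : M+1-(M+1-k) = k := by omega
    rw [e, e2, ← Nat.choose_symm (show k ≤ M+1 by omega)]
    ring
  have hs := sum_range_symm (fun k => (((M+1).choose k : Nat):Int) * cref k * cref (M+1-k)) (M+2) hsym
  by_cases hpar : (M+2) % 2 = 1
  · rw [if_pos (show ((((M+2)%2 : Nat)):Int) = 1 by exact_mod_cast hpar)]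
    have g4 := pyGetD_map_range (fun k => (((M+1).choose k : Nat):Int)) (M+2) ((M+2)/2) (by omega)
    have g5 := pyGetD_map_range cref (M+2) ((M+2)/2) (by omega)
    rw [g4, g5]
    rw [if_pos hpar] at hs
    have htot : 2 * ((List.range ((M+2)/2)).map
          (fun k => (((M+1).choose k : Nat):Int) * cref k * cref (M+1-k))).sum
        + (((M+1).choose ((M+2)/2) : Nat):Int) * cref ((M+2)/2) ^ 2
        = ((List.range (M+2)).map
          (fun k => (((M+1).choose k : Nat):Int) * cref k * cref (M+1-k))).sum := by
      simp only [hs, show M+1-(M+2)/2 = (M+2)/2 by omega]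
      ring
    rw [htot, ← cref_add_two M]
    rw [Prod.mk.injEq]
    exact ⟨by simp [List.range_succ], rfl⟩
  · rw [if_neg (show ¬((((M+2)%2 : Nat)):Int) = 1 by exact_mod_cast hpar)]
    rw [if_neg hpar] at hs
    have htot : 2 * ((List.range ((M+2)/2)).map
          (fun k => (((M+1).choose k : Nat):Int) * cref k * cref (M+1-k))).sum + 0
        = ((List.range (M+2)).map
          (fun k => (((M+1).choose k : Nat):Int) * cref k * cref (M+1-k))).sum := by
      rw [hs]
    rw [htot, ← cref_add_two M]
    rw [Prod.mk.injEq]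
    exact ⟨by simp [List.range_succ], rfl⟩

lemma A_inv (N m : Nat) (h1 : 1 ≤ m) (hm : m ≤ N) :
    (PySem.List.pyRange 2 ((m:Int)+1) 1).foldl stepA (initA (N : Int))
      = (List.range (m+1)).map cref ++ List.replicate (N - m) 0 := by
  induction m with
  | zero => omega
  | succ m ih =>
    rcases Nat.eq_or_lt_of_le h1 with h | h
    · rw [PySem.List.pyRange_one_eq_nil (by omega), List.foldl_nil]
      have : m = 0 := by omega
      subst this
      exact initA_eq N (by omega)
    · have hm1 : 1 ≤ m := by omega
      have : ((m:Int)+1)+1 = ((m+1:Nat):Int)+1 := by push_cast; ring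
      rw [show ((m+1:Nat):Int)+1 = ((m:Int)+1)+1 by push_cast; ring,
        PySem.List.pyRange_one_succ_right (by omega), List.foldl_append, List.foldl_cons,
        List.foldl_nil, ih hm1 (by omega)]
      exact stepA_eq N m hm1 (by omega)

lemma B_inv (m : Nat) (h1 : 1 ≤ m) :
    (PySem.List.pyRange 2 ((m:Int)+1) 1).foldl stepB ([1,1],[1])
      = ((List.range (m+1)).map cref, (List.range m).map (fun k => ((m-1).choose k : Int))) := by
  induction m with
  | zero => omega
  | succ m ih =>
    rcases Nat.eq_or_lt_of_le h1 with h | h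
    · rw [PySem.List.pyRange_one_eq_nil (by omega), List.foldl_nil]
      have : m = 0 := by omega
      subst this
      simp [cref, List.range_succ]
    · have hm1 : 1 ≤ m := by omega
      rw [show ((m+1:Nat):Int)+1 = ((m:Int)+1)+1 by push_cast; ring,
        PySem.List.pyRange_one_succ_right (by omega), List.foldl_append, List.foldl_cons,
        List.foldl_nil, ih hm1]
      exact stepB_eq m hm1

-- ===== VERDICT (by name: the statement is the Claim_ definition above) =====
theorem count_spec : Claim_equal_count := by
  intro n _ hpre
  unfold Spec_count
  by_cases h1 : n = 1
  · subst h1; decide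
  · have hN2 : 2 ≤ n := by unfold Pre_count at hpre; omega
    obtain ⟨N, hN⟩ : ∃ N : Nat, n = (N : Int) := ⟨n.toNat, by omega⟩
    subst hN
    have hN2' : 2 ≤ N := by exact_mod_cast hN2
    rw [count_eq _ h1, count_alt_eq _ h1,
      A_inv N N (by omega) le_rfl, B_inv N (by omega)]
    have hget : ∀ (xs : List Int), PySem.List.pyGetD ((List.range (N+1)).map cref ++ xs) (N:Int) 0 = cref N := by
      intro xs
      rw [PySem.List.pyGetD_natCast]
      rw [List.getD_eq_getElem?_getD, List.getElem?_append_left (by simp)]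
      simp
    have hget2 : PySem.List.pyGetD ((List.range (N+1)).map cref) (N:Int) 0 = cref N := by
      rw [PySem.List.pyGetD_natCast, List.getD_eq_getElem?_getD, List.getElem?_map]
      simp
    simp only [hget, hget2]
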